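-- pv_equiv track=rewrite | github.com/Arsen1302/Code-copy-detector | TestData/solutions/problem_1286_4.py | solution_1286_4
-- ===== SOURCE A (Python) =====
-- from typing import List
--
-- def solution_1286_4(nums: List[int]) -> int:
--     nums= sorted(nums)
--     res, val = 0, 0
--     for i in range(1,len(nums)):
--         if nums[i] > nums[i-1] :
--             res +=1
--         val += res
--     return val
-- ===== SOURCE B (Python) =====
-- from typing import List
--
-- def solution_1286_4(nums: List[int]) -> int:
--     counts = {}
--     for x in nums:
--         counts[x] = counts.get(x, 0) + 1
--     total = 0
--     for r, k in enumerate(sorted(counts)):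
--         total += r * counts[k]
--     return total
-- ===== Notes on version B (the rewrite author's own statement) =====
-- stated objective: alternative
-- what changed: Instead of sorting all elements and running a boundary counter across every consecutive pair, B builds a dict of value counts and makes one pass over the sorted distinct keys, adding rank*count for each key.
import Mathlib
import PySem

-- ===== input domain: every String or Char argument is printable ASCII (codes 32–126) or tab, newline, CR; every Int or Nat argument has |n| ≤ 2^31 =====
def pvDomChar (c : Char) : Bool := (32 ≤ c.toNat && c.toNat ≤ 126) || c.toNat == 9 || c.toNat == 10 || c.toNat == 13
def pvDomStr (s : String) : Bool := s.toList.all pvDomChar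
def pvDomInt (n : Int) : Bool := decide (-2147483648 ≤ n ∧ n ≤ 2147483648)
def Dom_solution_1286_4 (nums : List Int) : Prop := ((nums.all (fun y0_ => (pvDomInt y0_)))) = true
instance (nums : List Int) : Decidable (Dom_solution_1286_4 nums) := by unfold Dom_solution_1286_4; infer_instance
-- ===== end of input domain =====

-- B replaces A's boundary-counting scan over every element of the sorted list by one
-- pass over the sorted DISTINCT keys of a count dict, adding rank*count per key
-- (an alternative algorithm; not claimed faster).

-- ===== PORT A =====
-- A sorts, then for i in 1..n-1 bumps res at each strict increase and adds res to val.
def solution_1286_4 (nums : List Int) : Int :=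
  let nums' := PySem.List.sorted nums (fun x => x) false
  let rv := (PySem.List.pyRange 1 (nums'.length : Int) 1).foldl
    (fun (rv : Int × Int) i =>
      let res := if PySem.List.pyGetD nums' i 0 > PySem.List.pyGetD nums' (i-1) 0 then rv.1 + 1 else rv.1
      (res, rv.2 + res)) (0, 0)
  rv.2

-- ===== PORT B =====
-- B counts values into a dict, then sums r * count over the enumerated sorted keys.
def solution_1286_4_alt (nums : List Int) : Int :=
  let counts := nums.foldl (fun (d : PySem.Dict Int Int) x => d.insert x (d.getD x 0 + 1)) PySem.Dict.empty
  let keys := PySem.List.sorted counts.keys (fun x => x) false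
  (PySem.List.enumerate keys 0).foldl (fun total rk => total + rk.1 * counts.getD rk.2 0) 0

-- ===== PRECONDITION & SPEC =====
def Spec_solution_1286_4 (nums : List Int) (out : Int) : Prop := out = solution_1286_4_alt nums
instance (nums : List Int) (out : Int) : Decidable (Spec_solution_1286_4 nums out) := by unfold Spec_solution_1286_4; infer_instance

-- ===== CLAIM (what is proved, stated in full; the proofs are below) =====
def Claim_equal_solution_1286_4 : Prop := ∀ (nums : List Int), Dom_solution_1286_4 nums → Spec_solution_1286_4 nums (solution_1286_4 nums)

-- ===== LEMMAS AND PROOFS =====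

-- Structural form of A's index loop: prev element, running res/val, remaining tail.
def goA (p res val : Int) : List Int → Int
  | [] => val
  | x :: t =>
    let res' := if p < x then res + 1 else res
    goA x res' (val + res') t

-- A's fold over pyRange (|pre|+1) |pre ++ p :: t| equals goA p res val t.
theorem A_loop (t : List Int) : ∀ (pre : List Int) (p res val : Int),
    ((PySem.List.pyRange ((pre.length : Int) + 1) (((pre ++ p :: t).length : Int)) 1).foldl
      (fun (rv : Int × Int) i =>
        (if PySem.List.pyGetD (pre ++ p :: t) (i-1) 0 < PySem.List.pyGetD (pre ++ p :: t) i 0 then rv.1 + 1 else rv.1,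
         rv.2 + if PySem.List.pyGetD (pre ++ p :: t) (i-1) 0 < PySem.List.pyGetD (pre ++ p :: t) i 0 then rv.1 + 1 else rv.1))
      (res, val)).2 = goA p res val t := by
  induction t with
  | nil =>
    intro pre p res val
    rw [PySem.List.pyRange_one_eq_nil (by simp)]
    simp [goA]
  | cons x t ih =>
    intro pre p res val
    have hlen : ((pre ++ p :: x :: t).length : Int) = (pre.length : Int) + 2 + t.length := by
      simp; ring
    rw [PySem.List.pyRange_one_cons (by rw [hlen]; omega), List.foldl_cons]
    have hgx : PySem.List.pyGetD (pre ++ p :: x :: t) ((pre.length : Int) + 1) 0 = x := by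
      have : ((pre.length : Int) + 1) = ((pre.length + 1 : Nat) : Int) := by push_cast; ring
      rw [this, PySem.List.pyGetD_natCast]
      rw [List.getD_eq_getElem?_getD, List.getElem?_append_right (by omega)]
      simp
    have hgp : PySem.List.pyGetD (pre ++ p :: x :: t) ((pre.length : Int) + 1 - 1) 0 = p := by
      have : ((pre.length : Int) + 1 - 1) = ((pre.length : Nat) : Int) := by ring
      rw [this, PySem.List.pyGetD_natCast]
      rw [List.getD_eq_getElem?_getD, List.getElem?_append_right (by omega)]
      simp
    rw [hgx, hgp]
    have hre : pre ++ p :: x :: t = (pre ++ [p]) ++ x :: t := by simp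
    have hlen2 : ((pre.length : Int) + 1) + 1 = (((pre ++ [p]).length : Nat) : Int) + 1 := by
      simp
    by_cases h : p < x
    · rw [if_pos h, hre, hlen2]
      have hih := ih (pre ++ [p]) x (res + 1) (val + (res + 1))
      simp only [goA, if_pos h]
      exact hih
    · rw [if_neg h, hre, hlen2]
      have hih := ih (pre ++ [p]) x res (val + res)
      simp only [goA, if_neg h]
      exact hih

-- A in terms of goA on the sorted list.
theorem portA_eq (nums : List Int) :
    solution_1286_4 nums =
      (match PySem.List.sorted nums (fun x => x) false with
        | [] => 0
        | h :: t => goA h 0 0 t) := by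
  unfold solution_1286_4
  cases hs : PySem.List.sorted nums (fun x => x) false with
  | nil => simp [PySem.List.pyRange_one_eq_nil]
  | cons h t =>
    have := A_loop t [] h 0 0
    simpa using this

-- goA over a run of copies of the previous value: res is unchanged, val grows by m*res.
theorem goA_replicate (m : Nat) : ∀ (p res val : Int) (rest : List Int),
    goA p res val (List.replicate m p ++ rest) = goA p res (val + m * res) rest := by
  induction m with
  | zero => intro p res val rest; simp
  | succ m ih =>
    intro p res val rest
    simp only [List.replicate_succ, List.cons_append, goA, lt_irrefl]
    rw [ih]
    congr 1
    push_cast; ring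

-- goA over runs of strictly increasing keys with positive counts = rank-weighted sum.
theorem goA_runs (ks : List Int) : ∀ (p res val : Int) (c : Int → Nat),
    (∀ k ∈ ks, 1 ≤ c k) → (∀ k ∈ ks, p < k) → ks.Pairwise (· < ·) →
    goA p res val (ks.flatMap (fun k => List.replicate (c k) k)) =
      val + ((PySem.List.enumerate ks (res + 1)).map (fun rk => rk.1 * (c rk.2 : Int))).sum := by
  induction ks with
  | nil => intro p res val c _ _ _; simp [goA, PySem.List.enumerate_nil]
  | cons k ks ih =>
    intro p res val c hc hgt hpw
    have hck : 1 ≤ c k := hc k (by simp)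
    have hrep : List.replicate (c k) k = k :: List.replicate (c k - 1) k := by
      cases hck' : c k with
      | zero => omega
      | succ n => simp [List.replicate_succ]
    simp only [List.flatMap_cons, hrep, List.cons_append, goA, hgt k (by simp), if_pos]
    rw [goA_replicate]
    rw [ih k (res + 1) _ c (fun k' hk' => hc k' (by simp [hk']))
      (fun k' hk' => List.rel_of_pairwise_cons hpw hk') (List.Pairwise.of_cons hpw)]
    rw [PySem.List.enumerate_cons]
    simp only [List.map_cons, List.sum_cons]
    have hcast : ((c k - 1 : Nat) : Int) = (c k : Int) - 1 := by omega
    rw [hcast]; ring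

-- count of x in the flattened runs of a nodup key list.
theorem count_flatMap_replicate (ks : List Int) (c : Int → Nat) (hnd : ks.Nodup) (x : Int) :
    (ks.flatMap (fun k => List.replicate (c k) k)).count x = if x ∈ ks then c x else 0 := by
  induction ks with
  | nil => simp
  | cons k ks ih =>
    simp only [List.flatMap_cons, List.count_append, List.count_replicate,
      ih (List.Nodup.of_cons hnd), List.mem_cons]
    rcases List.nodup_cons.mp hnd with ⟨hk, _⟩
    by_cases hxk : x = k
    · subst hxk
      simp [hk]
    · simp [hxk, Ne.symm hxk]

-- flattened runs of a strictly increasing key list are sorted (≤).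
theorem pairwise_flatMap_replicate (ks : List Int) (c : Int → Nat)
    (hpw : ks.Pairwise (· < ·)) :
    (ks.flatMap (fun k => List.replicate (c k) k)).Pairwise (· ≤ ·) := by
  induction ks with
  | nil => simp
  | cons k ks ih =>
    simp only [List.flatMap_cons]
    rw [List.pairwise_append]
    refine ⟨List.pairwise_replicate.mpr (Or.inr le_rfl), ih (List.Pairwise.of_cons hpw), ?_⟩
    intro a ha b hb
    have hak : a = k := List.eq_of_mem_replicate ha
    rcases List.mem_flatMap.mp hb with ⟨k', hk', hb'⟩
    have : b = k' := List.eq_of_mem_replicate hb'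
    subst hak this
    exact le_of_lt (List.rel_of_pairwise_cons hpw hk')

-- the sorted input is exactly the flattened runs over the sorted distinct keys.
theorem sorted_eq_runs (nums : List Int) :
    PySem.List.sorted nums (fun x => x) false =
      (PySem.List.sorted (PySem.Set.ofList nums) (fun x => x) false).flatMap
        (fun k => List.replicate (nums.count k) k) := by
  set ks := PySem.List.sorted (PySem.Set.ofList nums) (fun x => x) false with hks
  have hperm_ks : ks.Perm (PySem.Set.ofList nums) := PySem.List.sorted_perm _ _ _
  have hnd : ks.Nodup := hperm_ks.nodup_iff.mpr (PySem.Set.nodup_ofList nums)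
  have hmem : ∀ x, x ∈ ks ↔ x ∈ nums := by
    intro x
    rw [hperm_ks.mem_iff, PySem.Set.mem_ofList]
  have hcount : ∀ x, (ks.flatMap (fun k => List.replicate (nums.count k) k)).count x
      = nums.count x := by
    intro x
    rw [count_flatMap_replicate ks _ hnd x]
    by_cases hx : x ∈ nums
    · simp [(hmem x).mpr hx]
    · have hnk : x ∉ ks := fun h => hx ((hmem x).mp h)
      simp [hnk, List.count_eq_zero_of_not_mem hx]
  have hperm : (ks.flatMap (fun k => List.replicate (nums.count k) k)).Perm nums :=
    List.perm_iff_count.mpr hcount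
  exact PySem.List.sorted_id_eq_of_perm_of_pairwise _ _ hperm
    (pairwise_flatMap_replicate ks _ (PySem.List.sorted_ofList_pairwise_lt nums))

-- B as a rank-weighted sum over the sorted distinct keys.
theorem portB_eq (nums : List Int) :
    solution_1286_4_alt nums =
      ((PySem.List.enumerate (PySem.List.sorted (PySem.Set.ofList nums) (fun x => x) false) 0).map
        (fun rk => rk.1 * (nums.count rk.2 : Int))).sum := by
  simp only [solution_1286_4_alt, PySem.Dict.foldl_insert_getD_add_one_eq_counter,
    PySem.Dict.keys_counter, PySem.List.foldl_add, PySem.Dict.getD_counter, zero_add]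

-- ===== VERDICT (by name: the statement is the Claim_ definition above) =====
theorem solution_1286_4_spec : Claim_equal_solution_1286_4 := by
  intro nums _
  unfold Spec_solution_1286_4
  rw [portA_eq, portB_eq, sorted_eq_runs]
  set ks := PySem.List.sorted (PySem.Set.ofList nums) (fun x => x) false with hks
  have hpw : ks.Pairwise (· < ·) := PySem.List.sorted_ofList_pairwise_lt nums
  have hmem : ∀ x, x ∈ ks ↔ x ∈ nums := by
    intro x
    rw [(PySem.List.sorted_perm _ _ _).mem_iff, PySem.Set.mem_ofList]
  cases hk : ks with
  | nil => simp
  | cons k0 ks' =>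
    have hck : 1 ≤ nums.count k0 :=
      List.count_pos_iff.mpr ((hmem k0).mp (by simp [hk]))
    have hrep : List.replicate (nums.count k0) k0 = k0 :: List.replicate (nums.count k0 - 1) k0 := by
      cases h' : nums.count k0 with
      | zero => omega
      | succ n => simp [List.replicate_succ]
    simp only [List.flatMap_cons, hrep, List.cons_append]
    rw [goA_replicate]
    rw [goA_runs ks' k0 0 _ (fun k => nums.count k)
      (fun k hk' => List.count_pos_iff.mpr ((hmem k).mp (by simp [hk, hk'])))
      (by rw [hk] at hpw; exact fun k' hk' => List.rel_of_pairwise_cons hpw hk')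
      (by rw [hk] at hpw; exact List.Pairwise.of_cons hpw)]
    rw [PySem.List.enumerate_cons]
    simp
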